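-- pv_equiv track=rewrite | github.com/Matteo-Candi/Master-Thesis | results/test_01/test_01_formatted.py | delCost
-- ===== SOURCE A (Python) =====
-- def delCost(s, cost):
--     ans = 0
--     forMax = {}
--     forTot = {}
--     for i in range(len(s)):
--         if s[i] not in forMax:
--             forMax[s[i]] = cost[i]
--         else:
--             forMax[s[i]] = max(cost[i], forMax[s[i]])
--         if s[i] not in forTot:
--             forTot[s[i]] = cost[i]
--         else:
--             forTot[s[i]] += cost[i]
--     for i in forMax:
--         ans += forTot[i] - forMax[i]
--     return ans
-- ===== SOURCE B (Python) =====
-- def delCost(s, cost):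
--     ans = 0
--     for c in dict.fromkeys(s):
--         vals = [cost[i] for i in range(len(s)) if s[i] == c]
--         ans += sum(vals) - max(vals)
--     return ans
-- ===== Notes on version B (the rewrite author's own statement) =====
-- stated objective: alternative
-- what changed: B replaces A's single pass with two running dicts by a group-by-character decomposition: dedupe the characters (dict.fromkeys), then for each distinct character rescan the string to collect its costs and add sum(vals)-max(vals); no aggregation dicts and no final key-subtraction loop remain.
import Mathlib
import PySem

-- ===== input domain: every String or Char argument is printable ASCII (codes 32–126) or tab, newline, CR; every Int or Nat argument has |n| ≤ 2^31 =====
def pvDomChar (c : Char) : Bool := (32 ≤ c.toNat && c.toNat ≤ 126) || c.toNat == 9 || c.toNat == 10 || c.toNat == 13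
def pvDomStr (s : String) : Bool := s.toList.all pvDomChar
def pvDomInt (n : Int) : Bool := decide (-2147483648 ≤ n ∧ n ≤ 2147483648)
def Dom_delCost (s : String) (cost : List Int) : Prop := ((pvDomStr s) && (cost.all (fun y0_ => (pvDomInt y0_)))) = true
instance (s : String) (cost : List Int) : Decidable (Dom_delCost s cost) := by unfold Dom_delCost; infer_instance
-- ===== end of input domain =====

-- B groups by character (ordered dedup, then one rescan per distinct character summing costs minus their max) instead of A's single pass with two running dicts; objective: alternative.


-- ===== PORT A =====
-- loop body of A: update forMax (branch on membership) and forTot (branch on membership)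
def stepA (st : PySem.Dict Char Int × PySem.Dict Char Int) (c : Char) (ci : Int) :
    PySem.Dict Char Int × PySem.Dict Char Int :=
  let fM := if st.1.contains c = false then st.1.insert c ci
            else st.1.insert c (max ci (st.1.getD c 0))
  let fT := if st.2.contains c = false then st.2.insert c ci
            else st.2.insert c (st.2.getD c 0 + ci)
  (fM, fT)

-- A's final loop: for i in forMax: ans += forTot[i] - forMax[i]
def finishA (st : PySem.Dict Char Int × PySem.Dict Char Int) : Int :=
  st.1.keys.foldl (fun ans k => ans + (st.2.getD k 0 - st.1.getD k 0)) 0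

def delCost (s : String) (cost : List Int) : Int :=
  let cs := s.toList
  let st := (PySem.List.pyRange 0 (cs.length : Int) 1).foldl
      (fun st i => stepA st (PySem.List.pyGetD cs i ' ') (PySem.List.pyGetD cost i 0))
      (PySem.Dict.empty, PySem.Dict.empty)
  finishA st

-- ===== PORT B =====
-- for c in dict.fromkeys(s): vals = [cost[i] for i in range(len(s)) if s[i] == c]; ans += sum(vals) - max(vals)
-- (for every c the loop visits, vals is nonempty, so Python's max(vals) returns; the Option default 0 is unreachable)
def delCost_alt (s : String) (cost : List Int) : Int :=
  let cs := s.toList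
  (PySem.List.dedup cs).foldl (fun ans c =>
    let vals := ((PySem.List.pyRange 0 (cs.length : Int) 1).filter
        (fun i => PySem.List.pyGetD cs i ' ' == c)).map (fun i => PySem.List.pyGetD cost i 0)
    ans + (vals.sum - (PySem.List.max? vals (fun x => x)).getD 0)) 0

-- ===== PRECONDITION & SPEC =====
-- Pre_ excludes exactly the inputs with len(cost) < len(s), on which A (and B) raise IndexError at cost[i].
def Pre_delCost (s : String) (cost : List Int) : Prop := s.toList.length ≤ cost.length
instance (s : String) (cost : List Int) : Decidable (Pre_delCost s cost) := by unfold Pre_delCost; infer_instance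
def pvWitness_delCost : String × List Int := ("aba", [3, 1, 2])

def Spec_delCost (s : String) (cost : List Int) (out : Int) : Prop := out = delCost_alt s cost
instance (s : String) (cost : List Int) (out : Int) : Decidable (Spec_delCost s cost out) := by unfold Spec_delCost; infer_instance

-- ===== CLAIM (what is proved, stated in full; the proofs are below) =====
def Claim_equal_delCost : Prop := ∀ (s : String) (cost : List Int), Dom_delCost s cost → Pre_delCost s cost → Spec_delCost s cost (delCost s cost)

-- ===== LEMMAS AND PROOFS =====

-- costs of the occurrences of character c, in order (the group of c)
def grp (l : List (Char × Int)) (c : Char) : List Int :=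
  (l.filter (fun p => p.1 == c)).map Prod.snd

-- Python's max of a nonempty list (0 for [], never used there)
def maxL : List Int → Int
  | [] => 0
  | x :: t => t.foldl max x

lemma grp_append_singleton (l : List (Char × Int)) (c : Char) (v : Int) (c' : Char) :
    grp (l ++ [(c, v)]) c' = grp l c' ++ (if c == c' then [v] else []) := by
  by_cases h : c = c' <;> simp [grp, List.filter_append, h]

lemma maxL_append_singleton (g : List Int) (hg : g ≠ []) (v : Int) :
    maxL (g ++ [v]) = max (maxL g) v := by
  cases g with
  | nil => exact absurd rfl hg
  | cons x t => simp [maxL, List.foldl_append]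

-- index-fold over range(len cs) with in-range lookups = fold over the zipped pairs
lemma foldl_idx_zip {σ : Type} (f : σ → Char → Int → σ) :
    ∀ (cs : List Char) (cost : List Int) (init : σ), cs.length ≤ cost.length →
      (List.range cs.length).foldl (fun st k => f st (cs.getD k ' ') (cost.getD k 0)) init
        = (cs.zip cost).foldl (fun st p => f st p.1 p.2) init := by
  intro cs
  induction cs with
  | nil => intro cost init _; simp
  | cons c cs ih =>
      intro cost init h
      cases cost with
      | nil => simp at h
      | cons v cost =>
          simp only [List.length_cons]
          rw [List.range_succ_eq_map]
          simp only [List.foldl_cons, List.foldl_map, List.getD_cons_zero, List.getD_cons_succ,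
            List.zip_cons_cons]
          exact ih cost (f init c v) (by simpa using h)

-- B's per-character comprehension over indices = the group of c in the zipped pairs
lemma vals_idx_zip : ∀ (cs : List Char) (cost : List Int) (c : Char), cs.length ≤ cost.length →
    ((List.range cs.length).filter (fun k => cs.getD k ' ' == c)).map (fun k => cost.getD k 0)
      = grp (cs.zip cost) c := by
  intro cs
  induction cs with
  | nil => intro cost c _; simp [grp]
  | cons ch cs ih =>
      intro cost c h
      cases cost with
      | nil => simp at h
      | cons v cost =>
          have ih' := ih cost c (by simpa using h)
          simp only [grp] at ih' ⊢
          simp only [List.length_cons]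
          rw [List.range_succ_eq_map]
          by_cases hc : (ch == c) = true
          · simp [hc, List.filter_map, List.map_map, Function.comp_def, List.zip_cons_cons]
            simpa using ih'
          · simp [hc, List.filter_map, List.map_map, Function.comp_def, List.zip_cons_cons]
            simpa using ih'

-- a character is in the deduped firsts iff its group is nonempty
lemma mem_dedup_iff_grp_ne (l : List (Char × Int)) (c : Char) :
    c ∈ PySem.List.dedup (l.map Prod.fst) ↔ grp l c ≠ [] := by
  rw [PySem.List.dedup_eq_ofList, PySem.Set.mem_ofList]
  constructor
  · intro hmem hemp
    obtain ⟨p, hp, hfst⟩ := List.mem_map.mp hmem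
    have hf : l.filter (fun p => p.1 == c) = [] := List.map_eq_nil_iff.mp hemp
    have := List.filter_eq_nil_iff.mp hf p hp
    simp [hfst] at this
  · intro hne
    obtain ⟨x, hx⟩ := List.exists_mem_of_ne_nil _ hne
    simp only [grp] at hx
    obtain ⟨p, hp, _⟩ := List.mem_map.mp hx
    have := List.mem_filter.mp hp
    exact List.mem_map.mpr ⟨p, this.1, by simpa using this.2⟩

-- characterization of A's fold: keys are the deduped characters, forMax holds the group max, forTot the group sum
lemma FA_char (l : List (Char × Int)) :
    (l.foldl (fun st p => stepA st p.1 p.2) (PySem.Dict.empty, PySem.Dict.empty)).1.keys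
        = PySem.List.dedup (l.map Prod.fst)
    ∧ (∀ c, (l.foldl (fun st p => stepA st p.1 p.2) (PySem.Dict.empty, PySem.Dict.empty)).1.get? c
        = if grp l c = [] then none else some (maxL (grp l c)))
    ∧ (∀ c, (l.foldl (fun st p => stepA st p.1 p.2) (PySem.Dict.empty, PySem.Dict.empty)).2.get? c
        = if grp l c = [] then none else some ((grp l c).sum)) := by
  induction l using List.reverseRecOn with
  | nil => refine ⟨rfl, fun c => by simp [grp, PySem.Dict.get?_empty], fun c => by simp [grp, PySem.Dict.get?_empty]⟩
  | append_singleton l p ih =>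
      obtain ⟨c, v⟩ := p
      obtain ⟨ihk, ihM, ihT⟩ := ih
      rw [List.foldl_append] at *
      set st := l.foldl (fun st p => stepA st p.1 p.2) (PySem.Dict.empty, PySem.Dict.empty) with hst
      simp only [List.foldl_cons, List.foldl_nil]
      have hcontM : st.1.contains c = (grp l c ≠ [] : Bool) := by
        rw [PySem.Dict.contains_eq_isSome_get?, ihM c]
        by_cases h : grp l c = [] <;> simp [h]
      have hcontT : st.2.contains c = (grp l c ≠ [] : Bool) := by
        rw [PySem.Dict.contains_eq_isSome_get?, ihT c]
        by_cases h : grp l c = [] <;> simp [h]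
      by_cases hg : grp l c = []
      · -- fresh character: both branches take the insert-new path
        have hM : st.1.contains c = false := by simp [hcontM, hg]
        have hT : st.2.contains c = false := by simp [hcontT, hg]
        have hstepM : (stepA st c v).1 = st.1.insert c v := by simp [stepA, hM]
        have hstepT : (stepA st c v).2 = st.2.insert c v := by simp [stepA, hM, hT]
        refine ⟨?_, ?_, ?_⟩
        · show (stepA st c v).1.keys = _
          rw [hstepM, PySem.Dict.keys_insert_of_not_contains st.1 v hM, ihk, List.map_append]
          simp only [List.map_cons, List.map_nil]
          rw [PySem.List.dedup_eq_ofList, PySem.List.dedup_eq_ofList,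
            PySem.Set.ofList_append_singleton, PySem.Set.add]
          have hnm : ¬ c ∈ PySem.Set.ofList (l.map Prod.fst) := by
            rw [← PySem.List.dedup_eq_ofList, mem_dedup_iff_grp_ne]; simp [hg]
          rw [if_neg (by simpa using hnm)]
        · intro c'
          show (stepA st c v).1.get? c' = _
          rw [hstepM, grp_append_singleton]
          by_cases hcc : c' = c
          · subst hcc
            rw [PySem.Dict.get?_insert_self, hg]
            simp [maxL]
          · rw [PySem.Dict.get?_insert_of_ne st.1 v hcc, ihM c']
            have : (c == c') = false := by simp [Ne.symm hcc]
            simp [this]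
        · intro c'
          show (stepA st c v).2.get? c' = _
          rw [hstepT, grp_append_singleton]
          by_cases hcc : c' = c
          · subst hcc
            rw [PySem.Dict.get?_insert_self, hg]
            simp
          · rw [PySem.Dict.get?_insert_of_ne st.2 v hcc, ihT c']
            have : (c == c') = false := by simp [Ne.symm hcc]
            simp [this]
      · -- seen character: both branches take the combine path
        have hM : st.1.contains c = true := by simp [hcontM, hg]
        have hT : st.2.contains c = true := by simp [hcontT, hg]
        have hMg : st.1.getD c 0 = maxL (grp l c) := by
          have h1 : st.1.get? c = some (maxL (grp l c)) := by rw [ihM c, if_neg hg]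
          exact PySem.Dict.getD_of_get?_eq_some st.1 0 h1
        have hTg : st.2.getD c 0 = (grp l c).sum := by
          have h1 : st.2.get? c = some ((grp l c).sum) := by rw [ihT c, if_neg hg]
          exact PySem.Dict.getD_of_get?_eq_some st.2 0 h1
        have hstepM : (stepA st c v).1 = st.1.insert c (max v (st.1.getD c 0)) := by
          simp [stepA, hM]
        have hstepT : (stepA st c v).2 = st.2.insert c (st.2.getD c 0 + v) := by
          simp [stepA, hM, hT]
        refine ⟨?_, ?_, ?_⟩
        · show (stepA st c v).1.keys = _
          rw [hstepM, PySem.Dict.keys_insert_of_contains st.1 _ hM, ihk, List.map_append]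
          simp only [List.map_cons, List.map_nil]
          rw [PySem.List.dedup_eq_ofList, PySem.List.dedup_eq_ofList,
            PySem.Set.ofList_append_singleton, PySem.Set.add]
          have hm : c ∈ PySem.Set.ofList (l.map Prod.fst) := by
            rw [← PySem.List.dedup_eq_ofList, mem_dedup_iff_grp_ne]; exact hg
          rw [if_pos (by simpa using (List.elem_iff.mpr hm))]
        · intro c'
          show (stepA st c v).1.get? c' = _
          rw [hstepM, grp_append_singleton]
          by_cases hcc : c' = c
          · subst hcc
            rw [PySem.Dict.get?_insert_self]
            simp only [beq_self_eq_true, if_pos]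
            rw [if_neg (by simp [hg]), maxL_append_singleton _ hg, hMg, max_comm]
          · rw [PySem.Dict.get?_insert_of_ne st.1 _ hcc, ihM c']
            have : (c == c') = false := by simp [Ne.symm hcc]
            simp [this]
        · intro c'
          show (stepA st c v).2.get? c' = _
          rw [hstepT, grp_append_singleton]
          by_cases hcc : c' = c
          · subst hcc
            rw [PySem.Dict.get?_insert_self]
            simp only [beq_self_eq_true, if_pos]
            rw [if_neg (by simp [hg]), hTg]
            simp
          · rw [PySem.Dict.get?_insert_of_ne st.2 _ hcc, ihT c']
            have : (c == c') = false := by simp [Ne.symm hcc]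
            simp [this]

-- ===== VERDICT (by name: the statement is the Claim_ definition above) =====
theorem delCost_spec : Claim_equal_delCost := by
  intro s cost _ hpre
  unfold Spec_delCost delCost delCost_alt
  dsimp only
  rw [PySem.List.pyRange_zero_natCast]
  simp only [List.foldl_map, List.filter_map, List.map_map, Function.comp_def,
    PySem.List.pyGetD_natCast]
  rw [foldl_idx_zip (fun st c v => stepA st c v) s.toList cost _ hpre]
  obtain ⟨hk, hM, hT⟩ := FA_char (s.toList.zip cost)
  set st := (s.toList.zip cost).foldl (fun st p => stepA st p.1 p.2)
      (PySem.Dict.empty, PySem.Dict.empty) with hst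
  unfold finishA
  rw [PySem.List.foldl_add, PySem.List.foldl_add]
  have hcs : (s.toList.zip cost).map Prod.fst = s.toList := List.map_fst_zip hpre
  rw [hk, hcs]
  congr 1
  congr 1
  apply List.map_congr_left
  intro c hc
  have hg : grp (s.toList.zip cost) c ≠ [] := by
    apply (mem_dedup_iff_grp_ne (s.toList.zip cost) c).mp
    rw [hcs]; exact hc
  have hvals : ((List.range s.toList.length).filter (fun k => s.toList.getD k ' ' == c)).map
      (fun k => cost.getD k 0) = grp (s.toList.zip cost) c := vals_idx_zip s.toList cost c hpre
  rw [hvals]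
  have hMg : st.1.getD c 0 = maxL (grp (s.toList.zip cost) c) :=
    PySem.Dict.getD_of_get?_eq_some st.1 0 (by rw [hM c, if_neg hg])
  have hTg : st.2.getD c 0 = (grp (s.toList.zip cost) c).sum :=
    PySem.Dict.getD_of_get?_eq_some st.2 0 (by rw [hT c, if_neg hg])
  rw [hMg, hTg]
  cases hgl : grp (s.toList.zip cost) c with
  | nil => exact absurd hgl hg
  | cons x t => rw [PySem.List.max?_id_cons]; simp [maxL]
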